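-- pv_equiv track=rewrite | github.com/tonyxxq/2mj | times.py | is_yisesijiegao
-- ===== SOURCE A (Python) =====
-- def is_yisesijiegao(data):
--     """
--     一色四节高，比如： 111222333444
--     """
--
--     # 去重且长度必须是 4
--     pais = set(data['kezi'].keys())
--     if len(pais) != 4:
--         return False
--
--     for i in range(1, 7):
--         if set([i, i + 1, i + 2, i + 3]).issubset(pais):
--             return True
--
--     return False
-- ===== SOURCE B (Python) =====
-- def is_yisesijiegao(data):
--     # Sort the distinct keys and do one span-and-range check: 4 distinct
--     # values are four consecutive pais iff max - min == 3, with min >= 1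
--     # and max <= 9 keeping the run inside the 1..9 tile range.
--     ks = sorted(set(data['kezi']))
--     return len(ks) == 4 and ks[3] - ks[0] == 3 and ks[0] >= 1 and ks[3] <= 9
-- ===== Notes on version B (the rewrite author's own statement) =====
-- stated objective: simpler
-- what changed: Replaces the six-candidate window enumeration over range(1,7) with sorting the distinct keys once and a single span-and-range check (len==4, max-min==3, 1<=min, max<=9).
import Mathlib
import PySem

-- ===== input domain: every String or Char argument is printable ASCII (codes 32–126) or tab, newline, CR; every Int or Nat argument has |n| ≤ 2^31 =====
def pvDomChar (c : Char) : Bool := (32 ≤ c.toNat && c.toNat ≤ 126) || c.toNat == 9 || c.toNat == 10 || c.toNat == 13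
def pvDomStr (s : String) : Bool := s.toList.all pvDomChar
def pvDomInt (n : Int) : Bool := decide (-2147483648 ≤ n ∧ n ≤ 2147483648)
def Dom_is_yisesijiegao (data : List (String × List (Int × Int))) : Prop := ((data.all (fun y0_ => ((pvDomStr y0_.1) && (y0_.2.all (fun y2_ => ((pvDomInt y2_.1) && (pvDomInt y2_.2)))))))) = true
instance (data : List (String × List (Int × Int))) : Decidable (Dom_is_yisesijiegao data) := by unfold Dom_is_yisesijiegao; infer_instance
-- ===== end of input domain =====

-- B replaces A's six-candidate window enumeration by sorting the distinct keys
-- once and one span-and-range check (len==4, max-min==3, 1≤min, max≤9);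
-- objective: simpler.

-- ===== PORT A =====
def is_yisesijiegao (data : List (String × List (Int × Int))) : Bool :=
  match data.find? (fun p => p.1 == "kezi") with
  | none => false   -- KeyError in Python; excluded by Pre_
  | some (_, ks) =>
    -- pais = set(data['kezi'].keys()) : first-occurrence distinct keys
    let pais : PySem.Set Int := PySem.Set.ofList (ks.map (·.1))
    if pais.length ≠ 4 then false
    else
      -- for i in range(1, 7): if {i,i+1,i+2,i+3} <= pais: return True
      (PySem.List.pyRange 1 7 1).any
        (fun i => PySem.Set.issubset (PySem.Set.ofList [i, i + 1, i + 2, i + 3]) pais)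

-- ===== PORT B =====
def is_yisesijiegao_alt (data : List (String × List (Int × Int))) : Bool :=
  -- ks = sorted(set(data['kezi']))
  match (PySem.Dict.mk data).get? "kezi" with
  | none => false   -- KeyError in Python; excluded by Pre_
  | some pairs =>
    let ks := PySem.List.sorted (PySem.Set.ofList (pairs.map (·.1))) (fun x => x) false
    -- len(ks) == 4 and ks[3] - ks[0] == 3 and ks[0] >= 1 and ks[3] <= 9
    -- (the indexing is guarded by len(ks) == 4, so both indices are in range)
    decide (ks.length = 4)
      && decide (PySem.List.pyGetD ks 3 0 - PySem.List.pyGetD ks 0 0 = 3)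
      && decide (1 ≤ PySem.List.pyGetD ks 0 0)
      && decide (PySem.List.pyGetD ks 3 0 ≤ 9)

-- ===== PRECONDITION & SPEC =====
-- Pre_ excludes exactly the inputs with no 'kezi' key, where the Python A raises KeyError.
def Pre_is_yisesijiegao (data : List (String × List (Int × Int))) : Prop :=
  "kezi" ∈ data.map (·.1)
instance (data : List (String × List (Int × Int))) : Decidable (Pre_is_yisesijiegao data) := by
  unfold Pre_is_yisesijiegao; infer_instance

def pvWitness_is_yisesijiegao : (List (String × List (Int × Int))) :=
  [("kezi", [(1, 3), (2, 3), (3, 3), (4, 3)])]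

def Spec_is_yisesijiegao (data : List (String × List (Int × Int))) (out : Bool) : Prop := out = is_yisesijiegao_alt data
instance (data : List (String × List (Int × Int))) (out : Bool) : Decidable (Spec_is_yisesijiegao data out) := by unfold Spec_is_yisesijiegao; infer_instance

-- ===== CLAIM (what is proved, stated in full; the proofs are below) =====
def Claim_equal_is_yisesijiegao : Prop := ∀ (data : List (String × List (Int × Int))), Dom_is_yisesijiegao data → Pre_is_yisesijiegao data → Spec_is_yisesijiegao data (is_yisesijiegao data)

-- ===== LEMMAS AND PROOFS =====

-- first-match association lookup and Dict.mk's get? agree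
lemma dict_get_eq_find (data : List (String × List (Int × Int))) :
    (PySem.Dict.mk data).get? "kezi"
      = (data.find? (fun p => p.1 == "kezi")).map (·.2) := by
  induction data with
  | nil => rfl
  | cons p rest ih =>
    obtain ⟨k, v⟩ := p
    rw [PySem.Dict.get?_mk_cons]
    by_cases hk : k = "kezi"
    · simp [hk]
    · simp only [List.find?_cons]
      have : (k == "kezi") = false := by simp [hk]
      simp [this, ih]

lemma quad_nodup (i : Int) : ([i, i + 1, i + 2, i + 3] : List Int).Nodup := by
  have h1 : i ≠ i + 1 := by omega
  have h2 : i ≠ i + 2 := by omega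
  have h3 : i ≠ i + 3 := by omega
  have h4 : i + 1 ≠ i + 2 := by omega
  have h5 : i + 1 ≠ i + 3 := by omega
  have h6 : i + 2 ≠ i + 3 := by omega
  simp [List.nodup_cons, h1, h2, h3, h4, h5, h6]

-- a 4-element nodup sublist of a 4-element nodup list exhausts it
lemma subset_four (quad ps : List Int) (hq : quad.Nodup) (hps : ps.Nodup)
    (hlq : quad.length = 4) (hlp : ps.length = 4) (hsub : ∀ x ∈ quad, x ∈ ps) :
    ∀ x, x ∈ ps ↔ x ∈ quad := by
  have hfs : quad.toFinset ⊆ ps.toFinset := by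
    intro x hx
    simp only [List.mem_toFinset] at hx ⊢
    exact hsub x hx
  have hcard : ps.toFinset.card ≤ quad.toFinset.card := by
    rw [List.toFinset_card_of_nodup hq, List.toFinset_card_of_nodup hps, hlq, hlp]
  have heq : quad.toFinset = ps.toFinset := Finset.eq_of_subset_of_card_le hfs hcard
  intro x
  constructor
  · intro hx
    have : x ∈ ps.toFinset := List.mem_toFinset.mpr hx
    rw [← heq] at this
    exact List.mem_toFinset.mp this
  · exact hsub x

-- the algorithmic core: window enumeration ⟷ span check on the sorted keys
lemma core (keys : List Int) :
    (let pais : PySem.Set Int := PySem.Set.ofList keys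
     if pais.length ≠ 4 then false
     else
       (PySem.List.pyRange 1 7 1).any
         (fun i => PySem.Set.issubset (PySem.Set.ofList [i, i + 1, i + 2, i + 3]) pais))
    = (let ks := PySem.List.sorted (PySem.Set.ofList keys) (fun x => x) false
       decide (ks.length = 4)
         && decide (PySem.List.pyGetD ks 3 0 - PySem.List.pyGetD ks 0 0 = 3)
         && decide (1 ≤ PySem.List.pyGetD ks 0 0)
         && decide (PySem.List.pyGetD ks 3 0 ≤ 9)) := by
  simp only
  set pais := PySem.Set.ofList keys with hpais
  set ks := PySem.List.sorted pais (fun x => x) false with hks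
  have hperm : ks.Perm pais := PySem.List.sorted_perm ..
  have hlen : ks.length = pais.length := hperm.length_eq
  have hmem : ∀ x, x ∈ ks ↔ x ∈ pais := fun x => hperm.mem_iff
  by_cases h4 : pais.length = 4
  · have hk4 : ks.length = 4 := by omega
    obtain ⟨a, b, c, d, hkeq⟩ : ∃ a b c d, ks = [a, b, c, d] := by
      match ks, hk4 with
      | [a, b, c, d], _ => exact ⟨a, b, c, d, rfl⟩
    have hsorted : ks.Pairwise (· < ·) := PySem.List.sorted_ofList_pairwise_lt ..
    rw [hkeq] at hsorted
    have hab : a < b := by simp [List.pairwise_cons] at hsorted; omega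
    have hbc : b < c := by simp [List.pairwise_cons] at hsorted; omega
    have hcd : c < d := by simp [List.pairwise_cons] at hsorted; omega
    have hnd : pais.Nodup := PySem.Set.nodup_ofList _
    have hmem' : ∀ x, x ∈ pais ↔ x ∈ ([a, b, c, d] : List Int) := by
      intro x; rw [← hmem x, hkeq]
    have hget0 : PySem.List.pyGetD ks 0 0 = a := by rw [hkeq]; rfl
    have hget3 : PySem.List.pyGetD ks 3 0 = d := by rw [hkeq]; rfl
    simp only [h4, ne_eq, not_true_eq_false, if_false, hk4, hget0, hget3, decide_true,
      Bool.true_and]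
    have hof : ∀ i : Int, PySem.Set.ofList [i, i + 1, i + 2, i + 3] = [i, i + 1, i + 2, i + 3] :=
      fun i => PySem.Set.ofList_eq_self_of_nodup _ (quad_nodup i)
    apply Bool.eq_iff_iff.mpr
    simp only [List.any_eq_true, PySem.List.mem_pyRange_one, hof, PySem.Set.issubset_iff,
      Bool.and_eq_true, decide_eq_true_eq]
    constructor
    · rintro ⟨i, ⟨h1, h7⟩, hsub⟩
      -- the four window values fill the four slots, in order
      have hiff := subset_four [i, i + 1, i + 2, i + 3] pais (quad_nodup i) hnd (by simp)
        h4 hsub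
      have hwin : ∀ x, x ∈ ([a, b, c, d] : List Int) ↔ x ∈ ([i, i + 1, i + 2, i + 3] : List Int) := by
        intro x; rw [← hmem' x]; exact hiff x
      have ha : a ∈ ([i, i + 1, i + 2, i + 3] : List Int) := (hwin a).mp (by simp)
      have hd : d ∈ ([i, i + 1, i + 2, i + 3] : List Int) := (hwin d).mp (by simp)
      have hi : i ∈ ([a, b, c, d] : List Int) := (hwin i).mpr (by simp)
      have hi3 : i + 3 ∈ ([a, b, c, d] : List Int) := (hwin (i + 3)).mpr (by simp)
      simp only [List.mem_cons, List.not_mem_nil, or_false] at ha hd hi hi3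
      exact ⟨⟨by omega, by omega⟩, by omega⟩
    · rintro ⟨⟨hspan, h1a⟩, hd9⟩
      -- a < b < c < d with d - a = 3 forces consecutive values
      have hb : b = a + 1 := by omega
      have hc : c = a + 2 := by omega
      have hd : d = a + 3 := by omega
      refine ⟨a, ⟨h1a, by omega⟩, ?_⟩
      intro x hx
      rw [hmem' x]
      simp only [List.mem_cons, List.not_mem_nil, or_false] at hx ⊢
      omega
  · have hk4 : ks.length ≠ 4 := by omega
    simp [h4, hk4]

-- ===== VERDICT (by name: the statement is the Claim_ definition above) =====
theorem is_yisesijiegao_spec : Claim_equal_is_yisesijiegao := by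
  intro data _ _
  unfold Spec_is_yisesijiegao is_yisesijiegao is_yisesijiegao_alt
  rw [dict_get_eq_find]
  cases h : data.find? (fun p => p.1 == "kezi") with
  | none => rfl
  | some p =>
    obtain ⟨_, ks⟩ := p
    simp only [Option.map_some]
    exact core (ks.map (·.1))
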